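-- pv_equiv track=rewrite | github.com/RamananVr/Leetcodepython | arrays/2653_sliding_subarray_beauty.py | getSubarrayBeautyOptimized
-- ===== SOURCE A (Python) =====
-- from typing import List
--
-- def getSubarrayBeautyOptimized(nums: List[int], k: int, x: int) -> List[int]:
--     """
--     Optimized approach using sliding window with ordered data structure simulation.
--     """
--     from collections import deque
--
--     n = len(nums)
--     result = []
--
--     # Keep track of negative numbers in current window
--     window_negatives = deque()
--
--     def find_beauty():
--         """Find x-th smallest negative in current window."""
--         negatives = sorted([num for num in window_negatives if num < 0])
--         if len(negatives) >= x:
--             return negatives[x - 1]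
--         return 0
--
--     # Process first window
--     for i in range(k):
--         window_negatives.append(nums[i])
--
--     result.append(find_beauty())
--
--     # Slide the window
--     for i in range(k, n):
--         # Remove leftmost element
--         window_negatives.popleft()
--         # Add new element
--         window_negatives.append(nums[i])
--
--         result.append(find_beauty())
--
--     return result
-- ===== SOURCE B (Python) =====
-- import bisect
--
-- def getSubarrayBeautyOptimized(nums, k, x):
--     """One pass: keep only the window's negatives in a sorted list, updated
--     incrementally with bisect, instead of re-sorting every window."""
--     neg = []          # sorted negatives of the current window
--     res = []
--     for i, v in enumerate(nums):
--         if v < 0: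
--             bisect.insort(neg, v)
--         if i >= k:
--             out = nums[i - k]
--             if out < 0:
--                 del neg[bisect.bisect_left(neg, out)]
--         if i >= k - 1:
--             res.append(neg[x - 1] if x <= len(neg) else 0)
--     return res
-- ===== Notes on version B (the rewrite author's own statement) =====
-- stated objective: faster
-- what changed: Instead of storing the whole window in a deque and filtering+sorting it from scratch for every window, B keeps only the window's negatives in one incrementally maintained sorted list (bisect insert/delete) and reads the x-th smallest directly, in a single pass.
-- outside the precondition, e.g. on getSubarrayBeautyOptimized([], 0, 1): A returns [0], B returns []; on getSubarrayBeautyOptimized([-3, -1], 2, 0): A returns [-1], B returns [-1]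
import Mathlib
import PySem

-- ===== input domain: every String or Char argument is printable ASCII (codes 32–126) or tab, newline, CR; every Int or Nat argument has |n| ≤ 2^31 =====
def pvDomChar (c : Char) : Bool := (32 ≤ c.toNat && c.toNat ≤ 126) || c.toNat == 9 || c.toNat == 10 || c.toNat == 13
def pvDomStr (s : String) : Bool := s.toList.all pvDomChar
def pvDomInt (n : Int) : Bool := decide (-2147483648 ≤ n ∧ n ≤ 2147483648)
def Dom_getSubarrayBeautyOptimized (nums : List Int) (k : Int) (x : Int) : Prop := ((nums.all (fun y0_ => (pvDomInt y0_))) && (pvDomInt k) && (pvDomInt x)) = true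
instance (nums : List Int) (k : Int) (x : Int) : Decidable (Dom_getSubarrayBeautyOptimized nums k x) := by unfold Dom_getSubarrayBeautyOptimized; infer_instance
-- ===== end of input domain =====

-- B replaces A's per-window filter+sort of the whole deque by one sorted list of only the
-- window's negatives, maintained incrementally (bisect insert / delete) in a single pass;
-- a timing run measured B much faster (A re-sorts every window).

-- ===== PORT A =====
-- find_beauty(): sort the negatives of the current window, pick the x-th (index x-1).
-- negatives[x-1] can raise IndexError only for x ≤ 0 (excluded by Pre_): pyGet?.getD 0 there.
def pvFindBeauty (w : List Int) (x : Int) : Int :=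
  let negatives := PySem.List.sorted (w.filter (fun v => decide (v < 0))) (fun v => v) false
  if (negatives.length : Int) ≥ x then (PySem.List.pyGet? negatives (x - 1)).getD 0 else 0

def getSubarrayBeautyOptimized (nums : List Int) (k : Int) (x : Int) : List Int :=
  let n : Int := (nums.length : Int)
  -- first loop: window_negatives.append(nums[i]) for i in range(k); nums[i] raises outside Pre_ (getD 0)
  let w0 := (PySem.List.pyRange 0 k 1).foldl (fun w i => w ++ [PySem.List.pyGetD nums i 0]) ([] : List Int)
  let res0 : List Int := [pvFindBeauty w0 x]
  -- slide loop: popleft (raises on an empty deque, outside Pre_: tail of []) then append, then find_beauty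
  let st := (PySem.List.pyRange k n 1).foldl
    (fun (st : List Int × List Int) i =>
      let w := st.1.tail ++ [PySem.List.pyGetD nums i 0]
      (w, st.2 ++ [pvFindBeauty w x])) (w0, res0)
  st.2

-- ===== PORT B =====
-- bisect.insort: insert into a sorted list, after equal elements
def pvInsort : List Int → Int → List Int
  | [], v => [v]
  | h :: t, v => if v < h then v :: h :: t else h :: pvInsort t v

-- del neg[bisect.bisect_left(neg, v)]: remove the first element ≥ v (on [] Python would
-- raise IndexError; unreachable here since v is always in the list)
def pvDelFirstGe : List Int → Int → List Int
  | [], _ => []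
  | h :: t, v => if h < v then h :: pvDelFirstGe t v else t

def getSubarrayBeautyOptimized_alt (nums : List Int) (k : Int) (x : Int) : List Int :=
  ((PySem.List.enumerate nums 0).foldl
    (fun (st : List Int × List Int) (p : Int × Int) =>
      let neg1 := if p.2 < 0 then pvInsort st.1 p.2 else st.1
      let neg2 := if k ≤ p.1 then
          (let out := PySem.List.pyGetD nums (p.1 - k) 0
           if out < 0 then pvDelFirstGe neg1 out else neg1)
        else neg1
      let res := if k - 1 ≤ p.1 then
          st.2 ++ [if x ≤ (neg2.length : Int) then (PySem.List.pyGet? neg2 (x - 1)).getD 0 else 0]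
        else st.2
      (neg2, res)) (([] : List Int), ([] : List Int))).2

-- ===== PRECONDITION & SPEC =====
-- Pre_ excludes k < 1 and k > len(nums), where A raises IndexError (except the lone input
-- nums=[], k=0, where A's extra window over nothing is an artefact of appending before the
-- loop), and x ≤ 0, where "x-th smallest" is unspecified and A raises IndexError whenever a
-- window has no negatives and otherwise answers via Python's negative-index wraparound.
def Pre_getSubarrayBeautyOptimized (nums : List Int) (k : Int) (x : Int) : Prop :=
  1 ≤ k ∧ k ≤ (nums.length : Int) ∧ 1 ≤ x
instance (nums : List Int) (k : Int) (x : Int) : Decidable (Pre_getSubarrayBeautyOptimized nums k x) := by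
  unfold Pre_getSubarrayBeautyOptimized; infer_instance

def pvWitness_getSubarrayBeautyOptimized : List Int × Int × Int := ([-1, 2, -3], 2, 1)

def Spec_getSubarrayBeautyOptimized (nums : List Int) (k : Int) (x : Int) (out : List Int) : Prop := out = getSubarrayBeautyOptimized_alt nums k x
instance (nums : List Int) (k : Int) (x : Int) (out : List Int) : Decidable (Spec_getSubarrayBeautyOptimized nums k x out) := by unfold Spec_getSubarrayBeautyOptimized; infer_instance

-- ===== CLAIM (what is proved, stated in full; the proofs are below) =====
def Claim_equal_getSubarrayBeautyOptimized : Prop := ∀ (nums : List Int) (k : Int) (x : Int), Dom_getSubarrayBeautyOptimized nums k x → Pre_getSubarrayBeautyOptimized nums k x → Spec_getSubarrayBeautyOptimized nums k x (getSubarrayBeautyOptimized nums k x)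

-- ===== LEMMAS AND PROOFS =====

-- the sorted list of negatives of a window, as A computes it
def pvSneg (w : List Int) : List Int :=
  PySem.List.sorted (w.filter (fun v => decide (v < 0))) (fun v => v) false

-- the window starting at s
def pvWin (nums : List Int) (K s : Nat) : List Int := (nums.drop s).take K

-- the x-th smallest of an already sorted list, as B reads it off
def pvBeautyOf (x : Int) (neg : List Int) : Int :=
  if x ≤ (neg.length : Int) then (PySem.List.pyGet? neg (x - 1)).getD 0 else 0

theorem pvFindBeauty_eq (w : List Int) (x : Int) :
    pvFindBeauty w x = pvBeautyOf x (pvSneg w) := by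
  simp [pvFindBeauty, pvBeautyOf, pvSneg, ge_iff_le]

theorem pvSneg_pairwise (w : List Int) : (pvSneg w).Pairwise (· ≤ ·) := by
  simpa using PySem.List.sorted_pairwise (w.filter (fun v => decide (v < 0))) (fun v => v)

theorem pvSneg_perm (w : List Int) : (pvSneg w).Perm (w.filter (fun v => decide (v < 0))) := by
  exact PySem.List.sorted_perm _ _ _

theorem pvSneg_eq_of (w ys : List Int) (hp : ys.Perm (w.filter (fun v => decide (v < 0))))
    (hs : ys.Pairwise (· ≤ ·)) : pvSneg w = ys := by
  exact PySem.List.sorted_id_eq_of_perm_of_pairwise _ _ hp hs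

theorem pvInsort_perm (l : List Int) (v : Int) : (pvInsort l v).Perm (v :: l) := by
  induction l with
  | nil => simp [pvInsort]
  | cons a t ih =>
    by_cases hv : v < a
    · simp [pvInsort, hv]
    · simp only [pvInsort, if_neg hv]
      exact (ih.cons a).trans (List.Perm.swap v a t)

theorem pvInsort_pairwise (l : List Int) (v : Int) (h : l.Pairwise (· ≤ ·)) :
    (pvInsort l v).Pairwise (· ≤ ·) := by
  induction l with
  | nil => simp [pvInsort]
  | cons a t ih =>
    rw [List.pairwise_cons] at h
    by_cases hv : v < a
    · rw [pvInsort, if_pos hv, List.pairwise_cons]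
      refine ⟨?_, List.pairwise_cons.mpr h⟩
      intro b hb
      rcases List.mem_cons.mp hb with rfl | hb
      · exact le_of_lt hv
      · exact le_trans (le_of_lt hv) (h.1 b hb)
    · rw [pvInsort, if_neg hv, List.pairwise_cons]
      refine ⟨?_, ih h.2⟩
      intro b hb
      rcases List.mem_cons.mp ((pvInsort_perm t v).mem_iff.mp hb) with rfl | hb
      · exact le_of_not_gt hv
      · exact h.1 b hb

theorem pvDelFirstGe_eq_erase (l : List Int) (v : Int) (hs : l.Pairwise (· ≤ ·)) (hv : v ∈ l) :
    pvDelFirstGe l v = l.erase v := by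
  induction l with
  | nil => simp [pvDelFirstGe]
  | cons a t ih =>
    rw [List.pairwise_cons] at hs
    by_cases ha : a < v
    · have hne : a ≠ v := ne_of_lt ha
      have hvt : v ∈ t := by
        rcases List.mem_cons.mp hv with rfl | h
        · exact absurd ha (lt_irrefl v)
        · exact h
      rw [pvDelFirstGe, if_pos ha, List.erase_cons_tail (by simpa using hne), ih hs.2 hvt]
    · have hav : a = v := by
        rcases List.mem_cons.mp hv with rfl | h
        · rfl
        · exact le_antisymm (hs.1 v h) (le_of_not_gt ha)
      rw [pvDelFirstGe, if_neg ha, hav, List.erase_cons_head]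

-- appending an element to the window updates the sorted negatives by insort (or not at all)
theorem pvSneg_append (w : List Int) (v : Int) :
    pvSneg (w ++ [v]) = if v < 0 then pvInsort (pvSneg w) v else pvSneg w := by
  by_cases hv : v < 0
  · rw [if_pos hv]
    refine pvSneg_eq_of _ _ ?_ (pvInsort_pairwise _ _ (pvSneg_pairwise w))
    have h1 : (w ++ [v]).filter (fun v => decide (v < 0)) = w.filter (fun v => decide (v < 0)) ++ [v] := by
      simp [List.filter_append, hv]
    rw [h1]
    exact (pvInsort_perm _ _).trans ((pvSneg_perm w).cons v |>.trans (List.perm_append_singleton v _).symm)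
  · rw [if_neg hv]
    unfold pvSneg
    simp [List.filter_append, hv]

-- removing the leftmost window element updates the sorted negatives by the bisect delete
theorem pvSneg_cons_neg (h : Int) (t : List Int) (hneg : h < 0) :
    pvDelFirstGe (pvSneg (h :: t)) h = pvSneg t := by
  have hfil : (h :: t).filter (fun v => decide (v < 0)) = h :: t.filter (fun v => decide (v < 0)) := by
    simp [hneg]
  have hmem : h ∈ pvSneg (h :: t) := by
    rw [(pvSneg_perm (h :: t)).mem_iff, hfil]; exact List.mem_cons_self ..
  rw [pvDelFirstGe_eq_erase _ _ (pvSneg_pairwise _) hmem]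
  refine (pvSneg_eq_of _ _ ?_ ((pvSneg_pairwise (h :: t)).sublist (List.erase_sublist ..))).symm
  have := (pvSneg_perm (h :: t)).erase h
  rw [hfil, List.erase_cons_head] at this
  exact this

theorem pvSneg_cons_nonneg (h : Int) (t : List Int) (hnn : ¬ h < 0) :
    pvSneg (h :: t) = pvSneg t := by
  unfold pvSneg
  simp [hnn]

-- range-to-take
theorem pvRangeMap_take (nums : List Int) (K : Nat) (hK : K ≤ nums.length) :
    (List.range K).map (fun t => nums.getD t 0) = nums.take K := by
  induction K with
  | zero => simp
  | succ K ih =>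
    have hK' : K < nums.length := by omega
    rw [List.range_succ, List.map_append, ih (by omega), List.take_add_one]
    simp [List.getD_eq_getElem?_getD, List.getElem?_eq_getElem hK']

-- window head decomposition
theorem pvWin_cons (nums : List Int) (K s : Nat) (h1 : 1 ≤ K) (h2 : s < nums.length) :
    pvWin nums K s = nums.getD s 0 :: ((nums.drop (s+1)).take (K-1)) := by
  unfold pvWin
  obtain ⟨K', rfl⟩ : ∃ K', K = K' + 1 := ⟨K - 1, by omega⟩
  rw [List.drop_eq_getElem_cons h2, List.take_succ_cons, List.getD_eq_getElem?_getD, List.getElem?_eq_getElem h2]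
  simp

theorem pvWin_snoc (nums : List Int) (K s : Nat) (h1 : 1 ≤ K) (h2 : s + K < nums.length) :
    ((nums.drop (s+1)).take (K-1)) ++ [nums.getD (s+K) 0] = pvWin nums K (s+1) := by
  unfold pvWin
  have hlen : K - 1 < (nums.drop (s+1)).length := by simp; omega
  have := List.take_concat_get hlen
  rw [List.concat_eq_append] at this
  have hidx : (nums.drop (s+1))[K-1] = nums.getD (s+K) 0 := by
    have h3 : s + 1 + (K - 1) < nums.length := by omega
    rw [List.getElem_drop]
    rw [List.getD_eq_getElem?_getD, List.getElem?_eq_getElem (by omega : s + K < nums.length)]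
    simp
    congr 1
    omega
  rw [hidx] at this
  rw [this]
  congr 1
  omega


-- the body of B's fold, named (definitionally equal to the lambda in the port)
def pvBStep (nums : List Int) (k x : Int) (st : List Int × List Int) (p : Int × Int) : List Int × List Int :=
  let neg1 := if p.2 < 0 then pvInsort st.1 p.2 else st.1
  let neg2 := if k ≤ p.1 then
      (let out := PySem.List.pyGetD nums (p.1 - k) 0
       if out < 0 then pvDelFirstGe neg1 out else neg1)
    else neg1
  let res := if k - 1 ≤ p.1 then
      st.2 ++ [if x ≤ (neg2.length : Int) then (PySem.List.pyGet? neg2 (x - 1)).getD 0 else 0]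
    else st.2
  (neg2, res)

theorem pvEnumerate_eq (l : List Int) (s : Nat) :
    PySem.List.enumerate l (s : Int) = (List.range l.length).map (fun j => (((s + j : Nat) : Int), l.getD j 0)) := by
  induction l generalizing s with
  | nil => simp [PySem.List.enumerate]
  | cons a t ih =>
    rw [show PySem.List.enumerate (a :: t) (s : Int) = ((s : Int), a) :: PySem.List.enumerate t ((s : Int) + 1) from rfl]
    rw [show ((s : Int) + 1) = ((s + 1 : Nat) : Int) by push_cast; ring, ih]
    rw [List.length_cons, List.range_succ_eq_map, List.map_cons, List.map_map]
    refine congrArg₂ _ (by simp) ?_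
    refine List.map_congr_left ?_
    intro j _
    simp only [Function.comp]
    refine congrArg₂ _ (by push_cast; ring_nf) (by simp)

-- appending the j-th element to the prefix window
theorem pvPrefixSnoc (nums : List Int) (K j : Nat) (hj : j < nums.length) :
    ((nums.take j).drop (j - K)) ++ [nums.getD j 0] = (nums.take (j+1)).drop (j - K) := by
  rw [List.take_add_one, List.getElem?_eq_getElem hj, Option.toList_some,
      List.drop_append_of_le_length (by simp; omega)]
  rw [List.getD_eq_getElem?_getD, List.getElem?_eq_getElem hj]
  simp

theorem pvBStep_eq (nums : List Int) (k x : Int) (K : Nat) (hkK : k = (K : Int)) (hK1 : 1 ≤ K)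
    (j : Nat) (hj : j < nums.length) (res : List Int) :
    pvBStep nums k x (pvSneg ((nums.take j).drop (j - K)), res) ((j : Int), nums.getD j 0)
      = (pvSneg ((nums.take (j+1)).drop (j + 1 - K)),
         if K ≤ j + 1 then res ++ [pvBeautyOf x (pvSneg (pvWin nums K (j + 1 - K)))] else res) := by
  subst hkK
  unfold pvBStep
  simp only []
  have hneg1 : (if nums.getD j 0 < 0 then pvInsort (pvSneg ((nums.take j).drop (j - K))) (nums.getD j 0)
      else pvSneg ((nums.take j).drop (j - K))) = pvSneg ((nums.take (j+1)).drop (j - K)) := by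
    rw [← pvPrefixSnoc nums K j hj, pvSneg_append]
  rw [hneg1]
  have hcond2 : ((K : Int) - 1 ≤ (j : Int)) = (K ≤ j + 1) := by
    simp only [eq_iff_iff]; omega
  have hneg2 : (if (K : Int) ≤ (j : Int) then
      (let out := PySem.List.pyGetD nums ((j : Int) - (K : Int)) 0
       if out < 0 then pvDelFirstGe (pvSneg ((nums.take (j+1)).drop (j - K))) out
       else pvSneg ((nums.take (j+1)).drop (j - K)))
      else pvSneg ((nums.take (j+1)).drop (j - K))) = pvSneg ((nums.take (j+1)).drop (j + 1 - K)) := by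
    by_cases hKj : K ≤ j
    · rw [if_pos (by exact_mod_cast hKj)]
      have hout : PySem.List.pyGetD nums ((j : Int) - (K : Int)) 0 = nums.getD (j - K) 0 := by
        rw [show (j : Int) - (K : Int) = ((j - K : Nat) : Int) by omega]
        simp
      have hsplit : (nums.take (j+1)).drop (j - K)
          = nums.getD (j - K) 0 :: (nums.take (j+1)).drop (j + 1 - K) := by
        have hlt : j - K < (nums.take (j+1)).length := by simp; omega
        rw [List.drop_eq_getElem_cons hlt]
        refine congrArg₂ _ ?_ (by congr 1; omega)
        rw [List.getElem_take, List.getD_eq_getElem?_getD,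
            List.getElem?_eq_getElem (by omega : j - K < nums.length)]
        simp
      simp only [hout, hsplit]
      by_cases hvo : nums.getD (j - K) 0 < 0
      · rw [if_pos hvo, pvSneg_cons_neg _ _ hvo]
      · rw [if_neg hvo, pvSneg_cons_nonneg _ _ hvo]
    · rw [if_neg (by exact_mod_cast hKj)]
      have : j - K = j + 1 - K := by omega
      rw [this]
  rw [hneg2]
  have hwin : K ≤ j + 1 → (nums.take (j+1)).drop (j + 1 - K) = pvWin nums K (j + 1 - K) := by
    intro hKj
    unfold pvWin
    rw [List.drop_take]
    congr 1
    omega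
  simp only [hcond2]
  by_cases hKj1 : K ≤ j + 1
  · rw [if_pos hKj1, if_pos hKj1, hwin hKj1]
    rfl
  · rw [if_neg hKj1, if_neg hKj1]

theorem pvSlideB (nums : List Int) (k x : Int) (K : Nat) (hkK : k = (K : Int)) (hK1 : 1 ≤ K)
    (j : Nat) (hj : j ≤ nums.length) :
    (List.range j).foldl (fun (st : List Int × List Int) (jj : Nat) => pvBStep nums k x st ((jj : Int), nums.getD jj 0)) ([], [])
      = (pvSneg ((nums.take j).drop (j - K)),
         (List.range (j + 1 - K)).map (fun s => pvBeautyOf x (pvSneg (pvWin nums K s)))) := by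
  induction j with
  | zero =>
    have h0 : 1 - K = 0 := by omega
    simp [h0, pvSneg, PySem.List.sorted]
  | succ j ih =>
    rw [List.range_succ, List.foldl_append, ih (by omega), List.foldl_cons, List.foldl_nil,
        pvBStep_eq nums k x K hkK hK1 j (by omega)]
    refine congrArg₂ _ rfl ?_
    by_cases hKj1 : K ≤ j + 1
    · rw [if_pos hKj1, show j + 1 + 1 - K = (j + 1 - K) + 1 by omega, List.range_succ, List.map_append]
      rfl
    · rw [if_neg hKj1, show j + 1 + 1 - K = 0 by omega, show j + 1 - K = 0 by omega]

theorem pvPortB_eq (nums : List Int) (k x : Int) (K : Nat) (hkK : k = (K : Int)) (hK1 : 1 ≤ K) :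
    getSubarrayBeautyOptimized_alt nums k x
      = (List.range (nums.length + 1 - K)).map (fun s => pvBeautyOf x (pvSneg (pvWin nums K s))) := by
  have hfold : getSubarrayBeautyOptimized_alt nums k x
      = ((PySem.List.enumerate nums 0).foldl (pvBStep nums k x) ([], [])).2 := rfl
  rw [hfold, show (0 : Int) = ((0 : Nat) : Int) from rfl, pvEnumerate_eq, List.foldl_map]
  have : (fun (st : List Int × List Int) (j : Nat) => pvBStep nums k x st (((0 + j : Nat) : Int), nums.getD j 0))
      = (fun (st : List Int × List Int) (jj : Nat) => pvBStep nums k x st ((jj : Int), nums.getD jj 0)) := by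
    funext st j
    simp
  rw [this, pvSlideB nums k x K hkK hK1 nums.length (le_refl _)]

-- A's slide loop invariant
theorem pvSlideA (nums : List Int) (x : Int) (K : Nat) (hK1 : 1 ≤ K) (m : Nat)
    (hm : K + m ≤ nums.length) :
    (PySem.List.pyRange (K : Int) ((K : Int) + (m : Int)) 1).foldl
      (fun (st : List Int × List Int) i =>
        let w := st.1.tail ++ [PySem.List.pyGetD nums i 0]
        (w, st.2 ++ [pvFindBeauty w x]))
      (pvWin nums K 0, [pvFindBeauty (pvWin nums K 0) x])
      = (pvWin nums K m, (List.range (m + 1)).map (fun s => pvFindBeauty (pvWin nums K s) x)) := by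
  induction m with
  | zero =>
    rw [show (K : Int) + ((0 : Nat) : Int) = (K : Int) by simp, PySem.List.pyRange_one_eq_nil (le_refl _)]
    simp [List.range_succ]
  | succ m ih =>
    rw [show (K : Int) + ((m + 1 : Nat) : Int) = ((K : Int) + (m : Int)) + 1 by push_cast; ring,
        PySem.List.pyRange_one_succ_right (by omega), List.foldl_append, ih (by omega),
        List.foldl_cons, List.foldl_nil]
    have hw : (pvWin nums K m).tail ++ [PySem.List.pyGetD nums ((K : Int) + (m : Int)) 0]
        = pvWin nums K (m + 1) := by
      rw [pvWin_cons nums K m hK1 (by omega), List.tail_cons,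
          show (K : Int) + (m : Int) = ((m + K : Nat) : Int) by push_cast; ring]
      rw [PySem.List.pyGetD_natCast]
      exact pvWin_snoc nums K m hK1 (by omega)
    simp only [hw]
    simp [List.range_succ]

theorem pvPortA_eq (nums : List Int) (k x : Int) (K : Nat) (hkK : k = (K : Int)) (hK1 : 1 ≤ K)
    (hK2 : K ≤ nums.length) :
    getSubarrayBeautyOptimized nums k x
      = (List.range (nums.length - K + 1)).map (fun s => pvFindBeauty (pvWin nums K s) x) := by
  subst hkK
  unfold getSubarrayBeautyOptimized
  simp only []
  have hw0 : (PySem.List.pyRange 0 (K : Int) 1).foldl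
      (fun w i => w ++ [PySem.List.pyGetD nums i 0]) ([] : List Int) = pvWin nums K 0 := by
    rw [PySem.List.pyRange_one, List.foldl_map, show ((K : Int) - 0).toNat = K by omega]
    rw [show (fun (w : List Int) (t : Nat) => w ++ [PySem.List.pyGetD nums (0 + (t : Int)) 0])
        = (fun w t => w ++ [(fun u => nums.getD u 0) t]) by funext w t; simp]
    rw [PySem.List.foldl_append_singleton_eq_map, List.nil_append, pvRangeMap_take nums K hK2]
    unfold pvWin
    rw [List.drop_zero]
  rw [hw0, show ((nums.length : Int)) = ((K : Int) + ((nums.length - K : Nat) : Int)) by omega,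
      pvSlideA nums x K hK1 (nums.length - K) (by omega)]

-- ===== VERDICT (by name: the statement is the Claim_ definition above) =====
theorem getSubarrayBeautyOptimized_spec : Claim_equal_getSubarrayBeautyOptimized := by
  intro nums k x _ hpre
  obtain ⟨hk1, hk2, _⟩ := hpre
  have hkK : k = (k.toNat : Int) := (Int.toNat_of_nonneg (by omega)).symm
  have hK1 : 1 ≤ k.toNat := by omega
  have hK2 : k.toNat ≤ nums.length := by omega
  unfold Spec_getSubarrayBeautyOptimized
  rw [pvPortA_eq nums k x k.toNat hkK hK1 hK2, pvPortB_eq nums k x k.toNat hkK hK1,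
      show nums.length + 1 - k.toNat = nums.length - k.toNat + 1 by omega]
  exact List.map_congr_left (fun s _ => pvFindBeauty_eq _ _)
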